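-- pv_equiv track=rewrite | github.com/Samvelio/test_data | books_pars.py | divide_books_btw_users
-- ===== SOURCE A (Python) =====
-- def divide_books_btw_users(books, users):
--     """
--         Распределение всех книг между пользователями.
--         Функция возвращает список со списками разной длины:
--         максимальное и минимальное количество книг у одного пользователя.
--     """
--     count_books = len(books) // len(users)
--     max_users = len(books) % len(users)
--     prev_index = 0
--     tmp = []
--     for i in range(0, len(users)):
--         next_index = prev_index + count_books
--         if i in range(max_users):
--             next_index = prev_index + count_books + 1
--         tmp.append(books[prev_index:next_index])
--         prev_index = next_index
--     return tmp
-- ===== SOURCE B (Python) =====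
-- def divide_books_btw_users(books, users):
--     count, rem = divmod(len(books), len(users))
--     bounds = [i * count + min(i, rem) for i in range(len(users) + 1)]
--     return [books[lo:hi] for lo, hi in zip(bounds, bounds[1:])]
-- ===== Notes on version B (the rewrite author's own statement) =====
-- stated objective: alternative
-- what changed: Replaced the running-accumulator loop carrying prev_index/next_index state by a closed-form boundary table (i*count + min(i, rem)) followed by a stateless slicing pass over consecutive boundary pairs.
import Mathlib
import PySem

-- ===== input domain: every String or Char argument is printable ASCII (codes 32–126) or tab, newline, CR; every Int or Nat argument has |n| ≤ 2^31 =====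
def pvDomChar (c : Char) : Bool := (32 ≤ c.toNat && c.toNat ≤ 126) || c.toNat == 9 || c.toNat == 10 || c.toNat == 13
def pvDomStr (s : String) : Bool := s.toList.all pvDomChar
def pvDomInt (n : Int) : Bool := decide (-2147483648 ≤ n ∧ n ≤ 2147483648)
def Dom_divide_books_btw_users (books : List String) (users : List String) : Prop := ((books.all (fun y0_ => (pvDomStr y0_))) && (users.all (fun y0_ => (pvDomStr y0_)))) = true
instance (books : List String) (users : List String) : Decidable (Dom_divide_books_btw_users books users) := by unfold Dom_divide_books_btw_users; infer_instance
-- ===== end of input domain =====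

-- B replaces A's running prev/next accumulator loop by a closed-form boundary table plus a stateless slicing pass (alternative decomposition, same O(n) cost).

-- ===== PORT A =====
def divide_books_btw_users (books : List String) (users : List String) : List (List String) :=
  let count_books : Int := PySem.Int.floordiv (books.length : Int) (users.length : Int)
  let max_users : Int := PySem.Int.mod (books.length : Int) (users.length : Int)
  ((PySem.List.pyRange 0 (users.length : Int) 1).foldl
    (fun (st : Int × List (List String)) i =>
      let next_index : Int := st.1 + count_books
      let next_index : Int := if 0 ≤ i ∧ i < max_users then st.1 + count_books + 1 else next_index
      (next_index, st.2 ++ [PySem.List.slice books (some st.1) (some next_index)]))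
    (0, [])).2

-- ===== PORT B =====
def divide_books_btw_users_alt (books : List String) (users : List String) : List (List String) :=
  let count : Int := PySem.Int.floordiv (books.length : Int) (users.length : Int)
  let rem : Int := PySem.Int.mod (books.length : Int) (users.length : Int)
  let bounds : List Int := (PySem.List.pyRange 0 ((users.length : Int) + 1) 1).map (fun i => i * count + min i rem)
  (bounds.zip bounds.tail).map (fun p => PySem.List.slice books (some p.1) (some p.2))

-- ===== PRECONDITION & SPEC =====
-- Pre_ excludes only users = [], on which Python A raises ZeroDivisionError (and B raises too).
def Pre_divide_books_btw_users (books : List String) (users : List String) : Prop := users ≠ []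
instance (books : List String) (users : List String) : Decidable (Pre_divide_books_btw_users books users) := by unfold Pre_divide_books_btw_users; infer_instance
def pvWitness_divide_books_btw_users : List String × List String := (["a", "b", "c"], ["u", "v"])

def Spec_divide_books_btw_users (books : List String) (users : List String) (out : List (List String)) : Prop := out = divide_books_btw_users_alt books users
instance (books : List String) (users : List String) (out : List (List String)) : Decidable (Spec_divide_books_btw_users books users out) := by unfold Spec_divide_books_btw_users; infer_instance

-- ===== CLAIM (what is proved, stated in full; the proofs are below) =====
def Claim_equal_divide_books_btw_users : Prop := ∀ (books : List String) (users : List String), Dom_divide_books_btw_users books users → Pre_divide_books_btw_users books users → Spec_divide_books_btw_users books users (divide_books_btw_users books users)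

-- ===== LEMMAS AND PROOFS =====

-- boundary function shared by the two characterisations
def pvBound (count rem : Int) (i : Int) : Int := i * count + min i rem

theorem pvBound_step (count rem : Int) (j : Int) (hj : 0 ≤ j) :
    pvBound count rem (j + 1)
      = (if 0 ≤ j ∧ j < rem then pvBound count rem j + count + 1 else pvBound count rem j + count) := by
  unfold pvBound
  split_ifs with h
  · have h1 : min (j + 1) rem = min j rem + 1 := by omega
    rw [h1]; ring
  · have h1 : min (j + 1) rem = min j rem := by omega
    rw [h1]; ring

-- A's loop characterised: starting at boundary pvBound j, the fold over range(j, j+n) appends the slices between consecutive boundaries.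
theorem A_loop (books : List String) (count rem : Int) :
    ∀ (n : Nat) (j : Int), 0 ≤ j → ∀ (acc : List (List String)),
    ((PySem.List.pyRange j (j + (n : Int)) 1).foldl
      (fun (st : Int × List (List String)) i =>
        (if 0 ≤ i ∧ i < rem then st.1 + count + 1 else st.1 + count,
         st.2 ++ [PySem.List.slice books (some st.1)
           (some (if 0 ≤ i ∧ i < rem then st.1 + count + 1 else st.1 + count))]))
      (pvBound count rem j, acc)).2
    = acc ++ (PySem.List.pyRange j (j + (n : Int)) 1).map
        (fun i => PySem.List.slice books (some (pvBound count rem i)) (some (pvBound count rem (i + 1)))) := by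
  intro n
  induction n with
  | zero => intro j hj acc; simp [PySem.List.pyRange_one_eq_nil]
  | succ m ih =>
    intro j hj acc
    have hrw : j + ((m + 1 : Nat) : Int) = (j + 1) + (m : Int) := by push_cast; ring
    rw [hrw, PySem.List.pyRange_one_cons (by omega : j < (j + 1) + (m : Int))]
    rw [List.foldl_cons, List.map_cons]
    have hstep := pvBound_step count rem j hj
    by_cases h : 0 ≤ j ∧ j < rem
    · rw [if_pos h]
      rw [show pvBound count rem j + count + 1 = pvBound count rem (j + 1) from by rw [hstep, if_pos h]]
      rw [ih (j + 1) (by omega) (acc ++ [_])]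
      simp
    · rw [if_neg h]
      rw [show pvBound count rem j + count = pvBound count rem (j + 1) from by rw [hstep, if_neg h]]
      rw [ih (j + 1) (by omega) (acc ++ [_])]
      simp

-- zip of the boundary table with its own tail = consecutive pairs
theorem pairs_lemma {α : Type} (g : Int → α) :
    ∀ (n : Nat) (j : Int),
    (((PySem.List.pyRange j (j + (n : Int) + 1) 1).map g).zip
      (((PySem.List.pyRange j (j + (n : Int) + 1) 1).map g).tail))
    = (PySem.List.pyRange j (j + (n : Int)) 1).map (fun i => (g i, g (i + 1))) := by
  intro n
  induction n with
  | zero =>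
    intro j
    simp [PySem.List.pyRange_one_singleton, PySem.List.pyRange_one_eq_nil]
  | succ m ih =>
    intro j
    have h1 : j + ((m + 1 : Nat) : Int) + 1 = (j + 1) + (m : Int) + 1 := by push_cast; ring
    have h2 : j + ((m + 1 : Nat) : Int) = (j + 1) + (m : Int) := by push_cast; ring
    rw [h1, h2]
    rw [PySem.List.pyRange_one_cons (by omega : j < (j + 1) + (m : Int) + 1)]
    rw [PySem.List.pyRange_one_cons (by omega : j < (j + 1) + (m : Int))]
    have h3 := PySem.List.pyRange_one_cons (by omega : (j + 1) < (j + 1) + (m : Int) + 1)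
    rw [h3]
    simp only [List.map_cons, List.tail_cons, List.zip_cons_cons]
    congr 1
    have h4 := ih (j + 1)
    rw [h3] at h4
    simpa using h4

-- the two ports with their `let`s unfolded (definitional)
theorem A_unfold (books users : List String) :
    divide_books_btw_users books users
    = ((PySem.List.pyRange 0 (users.length : Int) 1).foldl
        (fun (st : Int × List (List String)) i =>
          (if 0 ≤ i ∧ i < PySem.Int.mod (books.length : Int) (users.length : Int) then
             st.1 + PySem.Int.floordiv (books.length : Int) (users.length : Int) + 1
           else st.1 + PySem.Int.floordiv (books.length : Int) (users.length : Int),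
           st.2 ++ [PySem.List.slice books (some st.1)
             (some (if 0 ≤ i ∧ i < PySem.Int.mod (books.length : Int) (users.length : Int) then
                st.1 + PySem.Int.floordiv (books.length : Int) (users.length : Int) + 1
              else st.1 + PySem.Int.floordiv (books.length : Int) (users.length : Int)))]))
        (0, [])).2 := rfl

theorem B_unfold (books users : List String) :
    divide_books_btw_users_alt books users
    = ((((PySem.List.pyRange 0 ((users.length : Int) + 1) 1).map
          (fun i => pvBound (PySem.Int.floordiv (books.length : Int) (users.length : Int))
                            (PySem.Int.mod (books.length : Int) (users.length : Int)) i)).zip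
        (((PySem.List.pyRange 0 ((users.length : Int) + 1) 1).map
          (fun i => pvBound (PySem.Int.floordiv (books.length : Int) (users.length : Int))
                            (PySem.Int.mod (books.length : Int) (users.length : Int)) i)).tail)).map
        (fun p => PySem.List.slice books (some p.1) (some p.2))) := rfl

-- ===== VERDICT (by name: the statement is the Claim_ definition above) =====
theorem divide_books_btw_users_spec : Claim_equal_divide_books_btw_users := by
  intro books users _ hpre
  unfold Spec_divide_books_btw_users
  rw [A_unfold, B_unfold]
  have hk : 0 < (users.length : Int) := by
    have : users.length ≠ 0 := by simpa [List.length_eq_zero_iff] using hpre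
    omega
  set count := PySem.Int.floordiv (books.length : Int) (users.length : Int) with hc
  set rem := PySem.Int.mod (books.length : Int) (users.length : Int) with hr
  have hrem : 0 ≤ rem := PySem.Int.mod_nonneg _ hk
  have hb0 : pvBound count rem 0 = 0 := by unfold pvBound; omega
  have hA := A_loop books count rem users.length 0 le_rfl []
  rw [zero_add, hb0, List.nil_append] at hA
  have hB := pairs_lemma (pvBound count rem) users.length 0
  rw [zero_add] at hB
  rw [hA, hB, List.map_map]
  rfl
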